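-- pv_equiv track=rewrite | github.com/iTarek/quran-muaalem | src/quran_muaalem/decode.py | align_chunked_phonemes_sequence
-- ===== SOURCE A (Python) =====
-- def align_chunked_phonemes_sequence(
--     ref: list[list[str]],
--     predicted: list[list[str]],
-- ) -> list[bool]:
--     """Aligns phonemes level to get mask that descripts what is missing
--
--     Returns the mask for the `ref` inputs that best matches the `predicted`
--     Note element wise comparison but retuns mask for best seqence (even with errors)
--
--     Example (1): `predicted` length > `ref` length
--         ref: abcde
--         predicted: abcdef
--         Returns: [T, T, T, T]
--
--     Example (2): `predicted` length <`ref` length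
--         ref: abcde
--         predicted: abcd
--         Returns: [T, T, T, T, F]
--
--     Example (2): `predicted` length <`ref` length
--         ref: afcde
--         predicted: abcd
--         Returns: [T, T, T, T, F]
--
--
--     Len(mask] == Len(ref)
--
--     """
--
--     n = len(predicted)
--     m = len(ref)
--
--     if len(predicted) == len(ref):
--         return [True] * len(predicted)
--
--     if m == 0:
--         raise ValueError("`ref` length must not be zero length")
--
--     dp = [[0] * (m + 1) for _ in range(n + 1)]
--     choice = [[0] * (m + 1) for _ in range(n + 1)]
--
--     for j in range(m + 1):
--         dp[0][j] = 0
--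
--     for i in range(1, n + 1):
--         dp[i][0] = i
--
--     for i in range(1, n + 1):
--         for j in range(1, m + 1):
--             option1 = dp[i][j - 1]
--             option2 = dp[i - 1][j] + 1
--             cost = 0 if predicted[i - 1][0] == ref[j - 1][0] else 1
--             option3 = dp[i - 1][j - 1] + cost
--
--             if option3 <= option1 and option3 <= option2:
--                 dp[i][j] = option3
--                 choice[i][j] = 3
--             elif option1 <= option2:
--                 dp[i][j] = option1
--                 choice[i][j] = 1
--             else:
--                 dp[i][j] = option2
--                 choice[i][j] = 2
--
--     i = n
--     j = m
--     mask = []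
--     # res_chars = []
--     while i > 0 or j > 0:
--         if i > 0 and j > 0:
--             if choice[i][j] == 3:
--                 # res_chars.append(ref[j - 1])
--                 mask.append(True)
--                 i -= 1
--                 j -= 1
--             elif choice[i][j] == 2:
--                 # res_chars.append(missing_placeholder)
--                 i -= 1
--             else:
--                 j -= 1
--                 mask.append(False)
--         elif i > 0:
--             # res_chars.append(missing_placeholder)
--             i -= 1
--         else:
--             j -= 1
--             mask.append(False)
--
--     return mask[::-1]
-- ===== SOURCE B (Python) =====
-- def align_chunked_phonemes_sequence(
--     ref: list[list[str]],
--     predicted: list[list[str]],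
-- ) -> list[bool]:
--     """Forward Needleman-Wunsch where every cell carries its own mask:
--     no choice matrix and no traceback pass; a single forward sweep keeping
--     only two rows of (cost, mask) pairs."""
--     n = len(predicted)
--     m = len(ref)
--
--     if n == m:
--         return [True] * n
--
--     if m == 0:
--         raise ValueError("`ref` length must not be zero length")
--
--     # row 0: aligning the empty predicted prefix against ref[:j]
--     prev = [(0, [False] * j) for j in range(m + 1)]
--
--     for i in range(1, n + 1):
--         cur = [(i, [])]
--         for j in range(1, m + 1):
--             skip_ref = (cur[j - 1][0], cur[j - 1][1] + [False])
--             skip_pred = (prev[j][0] + 1, prev[j][1])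
--             cost = 0 if predicted[i - 1][0] == ref[j - 1][0] else 1
--             diag = (prev[j - 1][0] + cost, prev[j - 1][1] + [True])
--             if diag[0] <= skip_ref[0] and diag[0] <= skip_pred[0]:
--                 cur.append(diag)
--             elif skip_ref[0] <= skip_pred[0]:
--                 cur.append(skip_ref)
--             else:
--                 cur.append(skip_pred)
--         prev = cur
--
--     return prev[m][1]
-- ===== Notes on version B (the rewrite author's own statement) =====
-- stated objective: alternative
-- what changed: B replaces A's two-phase DP (choice matrix + backward traceback) by a single forward Needleman-Wunsch sweep in which every cell carries its own mask, keeping only two rows of (cost, mask) pairs; no choice matrix and no traceback loop exist.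
-- outside the precondition, e.g. on align_chunked_phonemes_sequence([], [['a']]): A raises ValueError, B raises ValueError; on align_chunked_phonemes_sequence([['a'], []], [['a']]): A raises IndexError, B raises IndexError
import Mathlib
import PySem

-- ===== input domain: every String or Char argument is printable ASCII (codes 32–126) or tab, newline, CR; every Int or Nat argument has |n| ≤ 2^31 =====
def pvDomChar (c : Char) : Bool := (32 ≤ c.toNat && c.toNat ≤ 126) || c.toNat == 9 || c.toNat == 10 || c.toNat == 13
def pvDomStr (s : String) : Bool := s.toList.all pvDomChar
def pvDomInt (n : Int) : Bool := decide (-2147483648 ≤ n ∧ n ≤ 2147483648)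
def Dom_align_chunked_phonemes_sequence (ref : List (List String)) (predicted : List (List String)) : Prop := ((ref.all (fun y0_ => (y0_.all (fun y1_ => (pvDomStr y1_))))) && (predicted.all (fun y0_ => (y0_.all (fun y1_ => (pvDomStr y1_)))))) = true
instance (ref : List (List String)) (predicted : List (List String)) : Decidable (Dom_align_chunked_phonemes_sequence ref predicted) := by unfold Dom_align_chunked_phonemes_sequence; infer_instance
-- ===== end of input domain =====

-- B replaces the choice matrix + backward traceback by a single forward sweep whose cells carry their own mask (two rows of (cost, mask) pairs); alternative decomposition, same mask.


-- matrix read dp[i][j] (all indices used by the ports are in range)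
def mgetD (xs : List (List Int)) (i j : Nat) : Int := (xs.getD i []).getD j 0
-- matrix write dp[i][j] = v
def mset (xs : List (List Int)) (i j : Nat) (v : Int) : List (List Int) :=
  xs.set i ((xs.getD i []).set j v)

-- ===== PORT A =====
-- loop body of `for j in range(m+1): dp[0][j] = 0`
def initRow0 (dp : List (List Int)) (j : Nat) : List (List Int) := mset dp 0 j 0
-- loop body of `for i in range(1, n+1): dp[i][0] = i`
def initCol (dp : List (List Int)) (i : Nat) : List (List Int) := mset dp i 0 (i : Int)

-- body of A's inner `for j` loop: updates (dp, choice) at cell (i, j)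
def fillA_cell (ref predicted : List (List String)) (i : Nat)
    (st : List (List Int) × List (List Int)) (j : Nat) : List (List Int) × List (List Int) :=
  let dp := st.1
  let ch := st.2
  let option1 := mgetD dp i (j-1)
  let option2 := mgetD dp (i-1) j + 1
  -- predicted[i-1][0] / ref[j-1][0]: in range on every input Pre_ admits
  let cost : Int := if (predicted.getD (i-1) []).getD 0 "" = (ref.getD (j-1) []).getD 0 "" then 0 else 1
  let option3 := mgetD dp (i-1) (j-1) + cost
  if option3 ≤ option1 ∧ option3 ≤ option2 then (mset dp i j option3, mset ch i j 3)
  else if option1 ≤ option2 then (mset dp i j option1, mset ch i j 1)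
  else (mset dp i j option2, mset ch i j 2)

-- body of A's outer `for i` loop
def fillA_row (ref predicted : List (List String)) (m : Nat)
    (st : List (List Int) × List (List Int)) (i : Nat) : List (List Int) × List (List Int) :=
  (List.range' 1 m).foldl (fillA_cell ref predicted i) st

-- A's traceback while-loop (fuel = number of remaining iterations; n+m always suffices)
def tbA (ch : List (List Int)) : Nat → Nat → Nat → List Bool → List Bool
  | 0, _, _, mask => mask
  | fuel+1, i, j, mask =>
    if i > 0 then
      if j > 0 then
        if mgetD ch i j = 3 then tbA ch fuel (i-1) (j-1) (mask ++ [true])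
        else if mgetD ch i j = 2 then tbA ch fuel (i-1) j mask
        else tbA ch fuel i (j-1) (mask ++ [false])
      else tbA ch fuel (i-1) j mask
    else if j > 0 then tbA ch fuel i (j-1) (mask ++ [false])
    else mask

def align_chunked_phonemes_sequence (ref : List (List String)) (predicted : List (List String)) : List Bool :=
  let n := predicted.length
  let m := ref.length
  if predicted.length = ref.length then List.replicate predicted.length true
  else if m = 0 then []  -- Python raises ValueError here; excluded by Pre_
  else
    let dp := List.replicate (n+1) (List.replicate (m+1) (0:Int))
    let ch := List.replicate (n+1) (List.replicate (m+1) (0:Int))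
    let dp := (List.range (m+1)).foldl initRow0 dp
    let dp := (List.range' 1 n).foldl initCol dp
    let st := (List.range' 1 n).foldl (fillA_row ref predicted m) (dp, ch)
    (tbA st.2 (n + m) n m []).reverse

-- ===== PORT B =====
-- body of B's inner `for j` loop: appends the chosen (cost, mask) cell to the current row
def altCell (ref predicted : List (List String)) (prev : List (Int × List Bool)) (i : Nat)
    (cur : List (Int × List Bool)) (j : Nat) : List (Int × List Bool) :=
  let sr := cur.getD (j-1) (0, [])
  let skip_ref : Int × List Bool := (sr.1, sr.2 ++ [false])
  let sp := prev.getD j (0, [])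
  let skip_pred : Int × List Bool := (sp.1 + 1, sp.2)
  let cost : Int := if (predicted.getD (i-1) []).getD 0 "" = (ref.getD (j-1) []).getD 0 "" then 0 else 1
  let pd := prev.getD (j-1) (0, [])
  let diag : Int × List Bool := (pd.1 + cost, pd.2 ++ [true])
  cur ++ [if diag.1 ≤ skip_ref.1 ∧ diag.1 ≤ skip_pred.1 then diag
          else if skip_ref.1 ≤ skip_pred.1 then skip_ref else skip_pred]

-- body of B's outer `for i` loop: builds row i from row i-1
def altRow (ref predicted : List (List String)) (m : Nat)
    (prev : List (Int × List Bool)) (i : Nat) : List (Int × List Bool) :=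
  (List.range' 1 m).foldl (altCell ref predicted prev i) [((i : Int), [])]

def align_chunked_phonemes_sequence_alt (ref : List (List String)) (predicted : List (List String)) : List Bool :=
  let n := predicted.length
  let m := ref.length
  if n = m then List.replicate n true
  else if m = 0 then []  -- Python raises ValueError here; excluded by Pre_
  else
    let prev := (List.range (m+1)).map (fun j => ((0:Int), List.replicate j false))
    (((List.range' 1 n).foldl (altRow ref predicted m) prev).getD m (0, [])).2

-- ===== PRECONDITION & SPEC =====
-- Pre_ excludes exactly the inputs where Python A raises: unequal lengths with ref empty
-- (ValueError), and unequal lengths with predicted nonempty and an empty inner list in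
-- ref or predicted, reached by predicted[i-1][0] / ref[j-1][0] (IndexError).
def Pre_align_chunked_phonemes_sequence (ref : List (List String)) (predicted : List (List String)) : Prop :=
  ref.length = predicted.length ∨
    (ref ≠ [] ∧ (predicted = [] ∨ ((∀ x ∈ ref, x ≠ []) ∧ (∀ x ∈ predicted, x ≠ []))))
instance (ref : List (List String)) (predicted : List (List String)) : Decidable (Pre_align_chunked_phonemes_sequence ref predicted) := by unfold Pre_align_chunked_phonemes_sequence; infer_instance

def pvWitness_align_chunked_phonemes_sequence : List (List String) × List (List String) :=
  ([["a"], ["b"]], [["a"], ["c"], ["b"]])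

def Spec_align_chunked_phonemes_sequence (ref : List (List String)) (predicted : List (List String)) (out : List Bool) : Prop := out = align_chunked_phonemes_sequence_alt ref predicted
instance (ref : List (List String)) (predicted : List (List String)) (out : List Bool) : Decidable (Spec_align_chunked_phonemes_sequence ref predicted out) := by unfold Spec_align_chunked_phonemes_sequence; infer_instance

-- ===== CLAIM (what is proved, stated in full; the proofs are below) =====
def Claim_equal_align_chunked_phonemes_sequence : Prop := ∀ (ref : List (List String)) (predicted : List (List String)), Dom_align_chunked_phonemes_sequence ref predicted → Pre_align_chunked_phonemes_sequence ref predicted → Spec_align_chunked_phonemes_sequence ref predicted (align_chunked_phonemes_sequence ref predicted)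

-- ===== LEMMAS AND PROOFS =====

-- substitution cost at cell (i, j) (i, j ≥ 1)
def costF (ref predicted : List (List String)) (i j : Nat) : Int :=
  if (predicted.getD (i-1) []).getD 0 "" = (ref.getD (j-1) []).getD 0 "" then 0 else 1

-- D ref predicted i j: the value dp[i][j] holds after the fill
def Drow (prev ci : Nat → Int) (i : Nat) : Nat → Int
  | 0 => (i : Int)
  | j+1 =>
    let o1 := Drow prev ci i j
    let o2 := prev (j+1) + 1
    let o3 := prev j + ci (j+1)
    if o3 ≤ o1 ∧ o3 ≤ o2 then o3 else if o1 ≤ o2 then o1 else o2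

def D (ref predicted : List (List String)) : Nat → Nat → Int
  | 0 => fun _ => 0
  | i+1 => Drow (D ref predicted i) (costF ref predicted (i+1)) (i+1)

-- C ref predicted i j: the value choice[i][j] holds after the fill (i, j ≥ 1)
def C (ref predicted : List (List String)) (i j : Nat) : Int :=
  if D ref predicted (i-1) (j-1) + costF ref predicted i j ≤ D ref predicted i (j-1) ∧
     D ref predicted (i-1) (j-1) + costF ref predicted i j ≤ D ref predicted (i-1) j + 1 then 3
  else if D ref predicted i (j-1) ≤ D ref predicted (i-1) j + 1 then 1 else 2

-- M ref predicted i j: the mask cell (i, j) carries in B == what A's traceback from (i, j) produces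
def Mrow (ref predicted : List (List String)) (i : Nat) (prevM : Nat → List Bool) : Nat → List Bool
  | 0 => []
  | j+1 =>
    if C ref predicted i (j+1) = 3 then prevM j ++ [true]
    else if C ref predicted i (j+1) = 1 then Mrow ref predicted i prevM j ++ [false]
    else prevM (j+1)

def M (ref predicted : List (List String)) : Nat → Nat → List Bool
  | 0 => fun j => List.replicate j false
  | i+1 => Mrow ref predicted (i+1) (M ref predicted i)

theorem D_zero_left (ref predicted : List (List String)) (j : Nat) : D ref predicted 0 j = 0 := rfl

theorem D_zero_right (ref predicted : List (List String)) (i : Nat) : D ref predicted i 0 = (i : Int) := by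
  cases i <;> rfl

theorem M_zero_left (ref predicted : List (List String)) (j : Nat) :
    M ref predicted 0 j = List.replicate j false := rfl

theorem M_zero_right (ref predicted : List (List String)) (i : Nat) : M ref predicted i 0 = [] := by
  cases i <;> rfl

theorem D_cell (ref predicted : List (List String)) (r t : Nat) (hr : 1 ≤ r) :
    D ref predicted r (t+1) =
      (if D ref predicted (r-1) t + costF ref predicted r (t+1) ≤ D ref predicted r t ∧
          D ref predicted (r-1) t + costF ref predicted r (t+1) ≤ D ref predicted (r-1) (t+1) + 1
       then D ref predicted (r-1) t + costF ref predicted r (t+1)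
       else if D ref predicted r t ≤ D ref predicted (r-1) (t+1) + 1
       then D ref predicted r t
       else D ref predicted (r-1) (t+1) + 1) := by
  obtain ⟨r', rfl⟩ : ∃ r', r = r' + 1 := ⟨r - 1, by omega⟩
  simp only [Nat.add_sub_cancel]
  show Drow (D ref predicted r') (costF ref predicted (r'+1)) (r'+1) (t+1) = _
  simp only [Drow]
  rw [show Drow (D ref predicted r') (costF ref predicted (r'+1)) (r'+1) t
      = D ref predicted (r'+1) t from rfl]

theorem C_cell (ref predicted : List (List String)) (r t : Nat) :
    C ref predicted r (t+1) =
      (if D ref predicted (r-1) t + costF ref predicted r (t+1) ≤ D ref predicted r t ∧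
          D ref predicted (r-1) t + costF ref predicted r (t+1) ≤ D ref predicted (r-1) (t+1) + 1
       then 3
       else if D ref predicted r t ≤ D ref predicted (r-1) (t+1) + 1
       then 1
       else 2) := by
  simp only [C, Nat.add_sub_cancel]

theorem C_cases (ref predicted : List (List String)) (i j : Nat) :
    C ref predicted i j = 3 ∨ C ref predicted i j = 1 ∨ C ref predicted i j = 2 := by
  unfold C
  split_ifs <;> simp

theorem M_cell (ref predicted : List (List String)) (r t : Nat) (hr : 1 ≤ r) :
    M ref predicted r (t+1) =
      (if C ref predicted r (t+1) = 3 then M ref predicted (r-1) t ++ [true]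
       else if C ref predicted r (t+1) = 1 then M ref predicted r t ++ [false]
       else M ref predicted (r-1) (t+1)) := by
  obtain ⟨r', rfl⟩ : ∃ r', r = r' + 1 := ⟨r - 1, by omega⟩
  simp only [Nat.add_sub_cancel]
  show Mrow ref predicted (r'+1) (M ref predicted r') (t+1) = _
  simp only [Mrow]
  rw [show Mrow ref predicted (r'+1) (M ref predicted r') t = M ref predicted (r'+1) t from rfl]

def Shape (n m : Nat) (dp : List (List Int)) : Prop :=
  dp.length = n+1 ∧ ∀ i, i ≤ n → (dp.getD i []).length = m+1

theorem getD_set_row (xs : List (List Int)) (i i' : Nat) (r : List Int) :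
    (xs.set i r).getD i' [] = if i = i' ∧ i < xs.length then r else xs.getD i' [] := by
  simp only [List.getD, List.getElem?_set]
  split_ifs with h1 h2 h3 h4 <;> simp_all <;> omega

theorem getD_set_val (row : List Int) (j j' : Nat) (v : Int) :
    (row.set j v).getD j' 0 = if j = j' ∧ j < row.length then v else row.getD j' 0 := by
  simp only [List.getD, List.getElem?_set]
  split_ifs with h1 h2 h3 h4 <;> simp_all <;> omega

theorem shape_mset {n m : Nat} {dp : List (List Int)} (hs : Shape n m dp)
    (i j : Nat) (v : Int) : Shape n m (mset dp i j v) := by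
  obtain ⟨h1, h2⟩ := hs
  refine ⟨by simp [mset, h1], ?_⟩
  intro i' hi'
  rw [mset, getD_set_row]
  split_ifs with h
  · rw [List.length_set, h.1]; exact h2 i' hi'
  · exact h2 i' hi'

theorem mgetD_mset_self {n m : Nat} {dp : List (List Int)} (hs : Shape n m dp)
    {i j : Nat} (hi : i ≤ n) (hj : j ≤ m) (v : Int) :
    mgetD (mset dp i j v) i j = v := by
  obtain ⟨h1, h2⟩ := hs
  rw [mgetD, mset, getD_set_row, if_pos ⟨rfl, by omega⟩, getD_set_val,
      if_pos ⟨rfl, by rw [h2 i hi]; omega⟩]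

theorem mgetD_mset_ne {dp : List (List Int)} {i j i' j' : Nat}
    (h : i ≠ i' ∨ j ≠ j') (v : Int) :
    mgetD (mset dp i j v) i' j' = mgetD dp i' j' := by
  rw [mgetD, mset, getD_set_row, mgetD]
  split_ifs with hc
  · rw [← hc.1, getD_set_val]
    split_ifs with hc2
    · rcases h with h | h
      · exact absurd hc.1 h
      · exact absurd hc2.1 h
    · rw [hc.1]
  · rfl

-- fill invariant: cells of the region (boundary + rows < k + row k up to column t) hold D
def InvD (ref predicted : List (List String)) (n m k t : Nat) (dp : List (List Int)) : Prop :=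
  Shape n m dp ∧ ∀ i j, i ≤ n → j ≤ m →
    (i = 0 ∨ j = 0 ∨ i < k ∨ (i = k ∧ j ≤ t)) → mgetD dp i j = D ref predicted i j

-- the three dp reads made at cell (r, t+1) already hold their D values
theorem cell_reads (ref predicted : List (List String)) {n m k t : Nat} {dp : List (List Int)}
    (h : InvD ref predicted n m k t dp) (r : Nat) (hr1 : 1 ≤ r) (hrk : r = k) (hrn : r ≤ n) (ht : t < m) :
    mgetD dp r t = D ref predicted r t ∧
    mgetD dp (r-1) (t+1) = D ref predicted (r-1) (t+1) ∧
    mgetD dp (r-1) t = D ref predicted (r-1) t := by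
  obtain ⟨_, h2⟩ := h
  refine ⟨h2 r t hrn (by omega) (by omega), h2 (r-1) (t+1) (by omega) (by omega) (by omega),
          h2 (r-1) t (by omega) (by omega) (by omega)⟩

-- the dp-component update A performs at cell (i, j) (proof helper for A's pair fold)
def dpCell (ref predicted : List (List String)) (i : Nat)
    (dp : List (List Int)) (j : Nat) : List (List Int) :=
  let o1 := mgetD dp i (j-1)
  let o2 := mgetD dp (i-1) j + 1
  let cost : Int := if (predicted.getD (i-1) []).getD 0 "" = (ref.getD (j-1) []).getD 0 "" then 0 else 1
  let o3 := mgetD dp (i-1) (j-1) + cost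
  mset dp i j (if o3 ≤ o1 ∧ o3 ≤ o2 then o3 else if o1 ≤ o2 then o1 else o2)

theorem dpCell_step (ref predicted : List (List String)) {n m r t : Nat} {dp : List (List Int)}
    (h : InvD ref predicted n m r t dp) (hr1 : 1 ≤ r) (hrn : r ≤ n) (ht : t < m) :
    InvD ref predicted n m r (t+1) (dpCell ref predicted r dp (t+1)) := by
  obtain ⟨hs, hv⟩ := h
  obtain ⟨e1, e2, e3⟩ := cell_reads ref predicted ⟨hs, hv⟩ r hr1 rfl hrn ht
  refine ⟨by exact shape_mset hs _ _ _, ?_⟩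
  intro i j hi hj hreg
  by_cases hc : i = r ∧ j = t + 1
  · obtain ⟨rfl, rfl⟩ := hc
    rw [dpCell]
    simp only [Nat.add_sub_cancel]
    rw [mgetD_mset_self hs (by omega) (by omega)]
    rw [e1, e2, e3, D_cell ref predicted i t hr1]
    rfl
  · rw [dpCell]
    rw [mgetD_mset_ne (by omega) _]
    exact hv i j hi hj (by omega)

theorem invD_next_row (ref predicted : List (List String)) {n m k : Nat} {dp : List (List Int)}
    (h : InvD ref predicted n m k m dp) : InvD ref predicted n m (k+1) 0 dp := by
  obtain ⟨hs, hv⟩ := h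
  exact ⟨hs, fun i j hi hj hreg => hv i j hi hj (by omega)⟩

-- A-side invariant: dp as in InvD, and choice holds C on the processed interior cells
def InvA (ref predicted : List (List String)) (n m k t : Nat)
    (st : List (List Int) × List (List Int)) : Prop :=
  InvD ref predicted n m k t st.1 ∧ Shape n m st.2 ∧
    ∀ i j, 1 ≤ i → i ≤ n → 1 ≤ j → j ≤ m →
      (i < k ∨ (i = k ∧ j ≤ t)) → mgetD st.2 i j = C ref predicted i j

theorem cellA_step (ref predicted : List (List String)) {n m r t : Nat}
    {st : List (List Int) × List (List Int)}
    (h : InvA ref predicted n m r t st) (hr1 : 1 ≤ r) (hrn : r ≤ n) (ht : t < m) :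
    InvA ref predicted n m r (t+1) (fillA_cell ref predicted r st (t+1)) := by
  obtain ⟨⟨hs, hv⟩, hcs, hcv⟩ := h
  obtain ⟨e1, e2, e3⟩ := cell_reads ref predicted ⟨hs, hv⟩ r hr1 rfl hrn ht
  have hcost : (if (predicted.getD (r-1) []).getD 0 "" = (ref.getD ((t+1)-1) []).getD 0 "" then (0:Int) else 1)
      = costF ref predicted r (t+1) := by
    simp only [costF]
  have hfst : (fillA_cell ref predicted r st (t+1)).1 = dpCell ref predicted r st.1 (t+1) := by
    rw [fillA_cell, dpCell]
    split_ifs with h1 h2 <;> rfl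
  have hsnd : (fillA_cell ref predicted r st (t+1)).2 = mset st.2 r (t+1) (C ref predicted r (t+1)) := by
    rw [fillA_cell, C_cell ref predicted r t]
    simp only [Nat.add_sub_cancel] at hcost ⊢
    rw [hcost, e1, e2, e3]
    split_ifs with h1 h2 <;> rfl
  refine ⟨?_, ?_, ?_⟩
  · rw [hfst]
    exact dpCell_step ref predicted ⟨hs, hv⟩ hr1 hrn ht
  · rw [hsnd]; exact shape_mset hcs _ _ _
  · intro i j hi1 hin hj1 hjm hreg
    rw [hsnd]
    by_cases hc : i = r ∧ j = t + 1
    · obtain ⟨rfl, rfl⟩ := hc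
      rw [mgetD_mset_self hcs (by omega) (by omega)]
    · rw [mgetD_mset_ne (by omega) _]
      exact hcv i j hi1 hin hj1 hjm (by omega)

theorem rowA_fold (ref predicted : List (List String)) {n m r : Nat}
    {st : List (List Int) × List (List Int)} (hr1 : 1 ≤ r) (hrn : r ≤ n) :
    ∀ t, t ≤ m → InvA ref predicted n m r 0 st →
      InvA ref predicted n m r t ((List.range' 1 t).foldl (fillA_cell ref predicted r) st) := by
  intro t
  induction t with
  | zero => intro _ h; simpa using h
  | succ t ih =>
    intro ht h
    rw [List.range'_concat, List.foldl_append]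
    have he : 1 + 1 * t = t + 1 := by omega
    rw [he]
    simp only [List.foldl_cons, List.foldl_nil]
    exact cellA_step ref predicted (ih (by omega) h) hr1 hrn (by omega)

theorem invA_next_row (ref predicted : List (List String)) {n m k : Nat}
    {st : List (List Int) × List (List Int)}
    (h : InvA ref predicted n m k m st) : InvA ref predicted n m (k+1) 0 st := by
  obtain ⟨hd, hcs, hcv⟩ := h
  exact ⟨invD_next_row ref predicted hd, hcs,
    fun i j hi1 hin hj1 hjm hreg => hcv i j hi1 hin hj1 hjm (by omega)⟩

theorem fillA_all (ref predicted : List (List String)) {n m : Nat}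
    {st : List (List Int) × List (List Int)} :
    ∀ k, k ≤ n → InvA ref predicted n m 0 m st →
      InvA ref predicted n m k m ((List.range' 1 k).foldl (fillA_row ref predicted m) st) := by
  intro k
  induction k with
  | zero => intro _ h; simpa using h
  | succ k ih =>
    intro hk h
    rw [List.range'_concat, List.foldl_append]
    have he : 1 + 1 * k = k + 1 := by omega
    rw [he]
    simp only [List.foldl_cons, List.foldl_nil]
    rw [fillA_row]
    exact rowA_fold ref predicted (by omega) (by omega) m (le_refl m)
      (invA_next_row ref predicted (ih (by omega) h))

-- initialization
theorem shape_replicate (n m : Nat) :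
    Shape n m (List.replicate (n+1) (List.replicate (m+1) (0:Int))) := by
  refine ⟨by simp, ?_⟩
  intro i hi
  rw [List.getD_replicate _ (by omega)]
  simp

theorem mgetD_replicate (n m i j : Nat) (hi : i ≤ n) (hj : j ≤ m) :
    mgetD (List.replicate (n+1) (List.replicate (m+1) (0:Int))) i j = 0 := by
  rw [mgetD, List.getD_replicate _ (by omega), List.getD_replicate _ (by omega)]

-- A's `dp[0][j] = 0` loop keeps the all-zero matrix all-zero
theorem initRow0_fold (n m : Nat) :
    ∀ t, t ≤ m + 1 →
      Shape n m ((List.range t).foldl initRow0 (List.replicate (n+1) (List.replicate (m+1) (0:Int)))) ∧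
      ∀ i j, i ≤ n → j ≤ m →
        mgetD ((List.range t).foldl initRow0 (List.replicate (n+1) (List.replicate (m+1) (0:Int)))) i j = 0 := by
  intro t
  induction t with
  | zero =>
    intro _
    exact ⟨shape_replicate n m, fun i j hi hj => mgetD_replicate n m i j hi hj⟩
  | succ t ih =>
    intro ht
    obtain ⟨hs, hv⟩ := ih (by omega)
    rw [List.range_succ, List.foldl_append]
    simp only [List.foldl_cons, List.foldl_nil]
    refine ⟨shape_mset hs _ _ _, ?_⟩
    intro i j hi hj
    by_cases hc : 0 = i ∧ t = j
    · rw [initRow0, ← hc.1, ← hc.2, mgetD_mset_self hs (by omega) (by omega)]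
    · rw [initRow0, mgetD_mset_ne (by tauto) _]
      exact hv i j hi hj

-- the `dp[i][0] = i` loop: characterize the matrix after it
theorem initCol_fold (n m : Nat) (dp : List (List Int)) (hs : Shape n m dp)
    (hv : ∀ i j, i ≤ n → j ≤ m → mgetD dp i j = 0) :
    ∀ k, k ≤ n →
      Shape n m ((List.range' 1 k).foldl initCol dp) ∧
      ∀ i j, i ≤ n → j ≤ m →
        mgetD ((List.range' 1 k).foldl initCol dp) i j =
          (if j = 0 ∧ 1 ≤ i ∧ i ≤ k then (i : Int) else 0) := by
  intro k
  induction k with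
  | zero =>
    intro _
    refine ⟨hs, ?_⟩
    intro i j hi hj
    rw [if_neg (by omega)]
    exact hv i j hi hj
  | succ k ih =>
    intro hk
    obtain ⟨hs', hv'⟩ := ih (by omega)
    rw [List.range'_concat, List.foldl_append]
    have he : 1 + 1 * k = k + 1 := by omega
    rw [he]
    simp only [List.foldl_cons, List.foldl_nil]
    refine ⟨shape_mset hs' _ _ _, ?_⟩
    intro i j hi hj
    by_cases hc : k + 1 = i ∧ 0 = j
    · rw [initCol, ← hc.1, ← hc.2, mgetD_mset_self hs' (by omega) (by omega),
          if_pos (by omega)]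
    · rw [initCol, mgetD_mset_ne (by tauto) _, hv' i j hi hj]
      by_cases hj0 : j = 0 ∧ 1 ≤ i ∧ i ≤ k
      · rw [if_pos hj0, if_pos (by omega)]
      · rw [if_neg hj0, if_neg (by omega)]

-- the initialized matrix satisfies the k = 0 fill invariant
theorem invD_of_init (ref predicted : List (List String)) (n m : Nat) (dp : List (List Int))
    (hs : Shape n m dp)
    (hv : ∀ i j, i ≤ n → j ≤ m → mgetD dp i j = (if j = 0 ∧ 1 ≤ i ∧ i ≤ n then (i : Int) else 0)) :
    InvD ref predicted n m 0 m dp := by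
  refine ⟨hs, ?_⟩
  intro i j hi hj hreg
  rw [hv i j hi hj]
  have : i = 0 ∨ j = 0 := by omega
  rcases this with rfl | rfl
  · rw [if_neg (by omega), D_zero_left]
  · rw [D_zero_right]
    by_cases h1 : 1 ≤ i
    · rw [if_pos (by omega)]
    · rw [if_neg (by omega)]
      omega

-- A's traceback from (i, j) appends exactly (M i j).reverse
theorem tbA_M (ref predicted : List (List String)) (n m : Nat) (ch : List (List Int))
    (hch : ∀ i j, 1 ≤ i → i ≤ n → 1 ≤ j → j ≤ m → mgetD ch i j = C ref predicted i j) :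
    ∀ fuel i j acc, i ≤ n → j ≤ m → i + j ≤ fuel →
      tbA ch fuel i j acc = acc ++ (M ref predicted i j).reverse := by
  intro fuel
  induction fuel with
  | zero =>
    intro i j acc hi hj hf
    have : i = 0 ∧ j = 0 := by omega
    obtain ⟨rfl, rfl⟩ := this
    simp [tbA, M_zero_right]
  | succ fuel ih =>
    intro i j acc hi hj hf
    rw [tbA]
    by_cases hi0 : i > 0
    · rw [if_pos hi0]
      by_cases hj0 : j > 0
      · rw [if_pos hj0]
        obtain ⟨j', rfl⟩ : ∃ j', j = j' + 1 := ⟨j - 1, by omega⟩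
        rw [hch i (j'+1) (by omega) hi (by omega) hj]
        rw [M_cell ref predicted i j' (by omega)]
        simp only [Nat.add_sub_cancel]
        rcases C_cases ref predicted i (j'+1) with hv | hv | hv
        · rw [hv]
          norm_num
          rw [ih (i-1) j' (acc ++ [true]) (by omega) (by omega) (by omega)]
          simp
        · rw [hv]
          norm_num
          rw [ih i j' (acc ++ [false]) hi (by omega) (by omega)]
          simp
        · rw [hv]
          norm_num
          rw [ih (i-1) (j'+1) acc (by omega) hj (by omega)]
      · rw [if_neg hj0]
        have hj' : j = 0 := by omega
        subst hj'
        rw [ih (i-1) 0 acc (by omega) (by omega) (by omega)]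
        rw [M_zero_right, M_zero_right]
    · rw [if_neg hi0]
      have hi' : i = 0 := by omega
      subst hi'
      by_cases hj0 : j > 0
      · rw [if_pos hj0]
        obtain ⟨j', rfl⟩ : ∃ j', j = j' + 1 := ⟨j - 1, by omega⟩
        simp only [Nat.add_sub_cancel]
        rw [ih 0 j' (acc ++ [false]) (by omega) (by omega) (by omega)]
        simp [M_zero_left, List.replicate_succ']
      · rw [if_neg hj0]
        have hj' : j = 0 := by omega
        subst hj'
        simp [M_zero_left]

-- B-side: getD of list append
theorem getD_append_lt {α : Type} [Inhabited α] (xs : List α) (x d : α) (j : Nat) (h : j < xs.length) :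
    (xs ++ [x]).getD j d = xs.getD j d := by
  simp [List.getD, List.getElem?_append_left h]

theorem getD_append_len {α : Type} [Inhabited α] (xs : List α) (x d : α) :
    (xs ++ [x]).getD xs.length d = x := by
  simp [List.getD]

-- B-side invariants
def PrevOK (ref predicted : List (List String)) (m i : Nat) (prev : List (Int × List Bool)) : Prop :=
  ∀ j, j ≤ m → prev.getD j (0, []) = (D ref predicted i j, M ref predicted i j)

def RowOK (ref predicted : List (List String)) (i t : Nat) (cur : List (Int × List Bool)) : Prop :=
  cur.length = t + 1 ∧
    ∀ j, j ≤ t → cur.getD j (0, []) = (D ref predicted i j, M ref predicted i j)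

theorem altCell_step (ref predicted : List (List String)) {m i t : Nat}
    {prev cur : List (Int × List Bool)} (hi : 1 ≤ i) (ht : t < m)
    (hp : PrevOK ref predicted m (i-1) prev) (hc : RowOK ref predicted i t cur) :
    RowOK ref predicted i (t+1) (altCell ref predicted prev i cur (t+1)) := by
  obtain ⟨hlen, hval⟩ := hc
  have hsr : cur.getD ((t+1)-1) (0, []) = (D ref predicted i t, M ref predicted i t) := by
    simp only [Nat.add_sub_cancel]; exact hval t (le_refl t)
  have hsp : prev.getD (t+1) (0, []) = (D ref predicted (i-1) (t+1), M ref predicted (i-1) (t+1)) :=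
    hp (t+1) (by omega)
  have hpd : prev.getD ((t+1)-1) (0, []) = (D ref predicted (i-1) t, M ref predicted (i-1) t) := by
    simp only [Nat.add_sub_cancel]; exact hp t (by omega)
  have hcost : (if (predicted.getD (i-1) []).getD 0 "" = (ref.getD ((t+1)-1) []).getD 0 "" then (0:Int) else 1)
      = costF ref predicted i (t+1) := by
    simp only [costF]
  have hnew : altCell ref predicted prev i cur (t+1)
      = cur ++ [(D ref predicted i (t+1), M ref predicted i (t+1))] := by
    rw [altCell]
    simp only [hsr, hsp, hpd, hcost]
    rw [D_cell ref predicted i t hi, M_cell ref predicted i t hi, C_cell ref predicted i t]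
    split_ifs with h1 h2 <;> simp_all
  rw [hnew]
  refine ⟨by simp [hlen], ?_⟩
  intro j hj
  by_cases hjt : j ≤ t
  · rw [getD_append_lt _ _ _ _ (by omega)]
    exact hval j hjt
  · have : j = t + 1 := by omega
    subst this
    rw [show t + 1 = cur.length from hlen.symm, getD_append_len]

theorem altRow_fold (ref predicted : List (List String)) {m i : Nat}
    {prev : List (Int × List Bool)} (hi : 1 ≤ i)
    (hp : PrevOK ref predicted m (i-1) prev) :
    ∀ t, t ≤ m →
      RowOK ref predicted i t
        ((List.range' 1 t).foldl (altCell ref predicted prev i) [((i : Int), [])]) := by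
  intro t
  induction t with
  | zero =>
    intro _
    refine ⟨rfl, ?_⟩
    intro j hj
    have : j = 0 := by omega
    subst this
    simp [List.getD, D_zero_right, M_zero_right]
  | succ t ih =>
    intro ht
    rw [List.range'_concat, List.foldl_append]
    have he : 1 + 1 * t = t + 1 := by omega
    rw [he]
    simp only [List.foldl_cons, List.foldl_nil]
    exact altCell_step ref predicted hi (by omega) hp (ih (by omega))

theorem getD_map_range {α : Type} [Inhabited α] (f : Nat → α) (k j : Nat) (hj : j < k) (d : α) :
    ((List.range k).map f).getD j d = f j := by
  simp [List.getD, List.getElem?_map, List.getElem?_range, hj]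

theorem altRows_all (ref predicted : List (List String)) (m : Nat) :
    ∀ k, PrevOK ref predicted m k
      ((List.range' 1 k).foldl (altRow ref predicted m)
        ((List.range (m+1)).map (fun j => ((0:Int), List.replicate j false)))) := by
  intro k
  induction k with
  | zero =>
    intro j hj
    simp only [List.range'_zero, List.foldl_nil]
    rw [getD_map_range _ _ _ (by omega)]
    rw [D_zero_left, M_zero_left]
  | succ k ih =>
    rw [List.range'_concat, List.foldl_append]
    have he : 1 + 1 * k = k + 1 := by omega
    rw [he]
    simp only [List.foldl_cons, List.foldl_nil]
    rw [altRow]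
    have h := altRow_fold ref predicted (i := k+1) (by omega)
      (by simpa using ih) m (le_refl m)
    exact h.2

-- main equivalence
theorem main_eq (ref predicted : List (List String))
    (hpre : Pre_align_chunked_phonemes_sequence ref predicted) :
    align_chunked_phonemes_sequence ref predicted = align_chunked_phonemes_sequence_alt ref predicted := by
  by_cases hlen : predicted.length = ref.length
  · simp only [align_chunked_phonemes_sequence, align_chunked_phonemes_sequence_alt, if_pos hlen]
  · have hm : ref.length ≠ 0 := by
      rcases hpre with h | ⟨h, _⟩
      · exact absurd h.symm hlen
      · simpa [List.length_eq_zero_iff] using h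
    simp only [align_chunked_phonemes_sequence, align_chunked_phonemes_sequence_alt,
      if_neg hlen, if_neg hm]
    set n := predicted.length with hn
    set m := ref.length with hmdef
    -- A side: choice matrix holds C
    have h0 := initRow0_fold n m (m+1) (le_refl _)
    have hAinit := initCol_fold n m _ h0.1 h0.2 n (le_refl n)
    have hA : InvA ref predicted n m n m
        ((List.range' 1 n).foldl (fillA_row ref predicted m)
          ((List.range' 1 n).foldl initCol ((List.range (m+1)).foldl initRow0
            (List.replicate (n+1) (List.replicate (m+1) (0:Int)))),
           List.replicate (n+1) (List.replicate (m+1) (0:Int)))) := by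
      apply fillA_all ref predicted n (le_refl n)
      exact ⟨invD_of_init ref predicted n m _ hAinit.1 hAinit.2,
        shape_replicate n m, fun i j hi1 _ _ _ hreg => by omega⟩
    -- A's traceback produces (M n m).reverse
    have hAres := tbA_M ref predicted n m _
      (fun i j hi1 hin hj1 hjm => hA.2.2 i j hi1 hin hj1 hjm (by omega))
      (n + m) n m [] (le_refl n) (le_refl m) (le_refl _)
    rw [hAres]
    -- B side: final row holds (D n ·, M n ·)
    have hB := altRows_all ref predicted m n m (le_refl m)
    rw [hB]
    simp

-- ===== VERDICT (by name: the statement is the Claim_ definition above) =====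
theorem align_chunked_phonemes_sequence_spec : Claim_equal_align_chunked_phonemes_sequence := by
  intro ref predicted _ hpre
  unfold Spec_align_chunked_phonemes_sequence
  exact main_eq ref predicted hpre
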